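-- pv_equiv track=rewrite | github.com/artisticdrake/VehicleDetection | main.py | bin_to_color
-- ===== SOURCE A (Python) =====
-- def bin_to_color(bin_index):
--     color_ranges = {
--         (0, 10): "Black",
--         (10, 30): "Dark Gray",
--         (30, 50): "Gray",
--         (50, 70): "Light Gray",
--         (70, 90): "Red",
--         (90, 110): "Orange",
--         (110, 130): "Yellow",
--         (130, 150): "Green",
--         (150, 170): "Cyan",
--         (170, 190): "Blue",
--         (190, 210): "Purple",
--         (210, 230): "Pink",
--         (230, 255): "White"
--     }
--     for range_, color in color_ranges.items():
--         if range_[0] <= bin_index < range_[1]: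
--             return color
--     return "Unknown"
-- ===== SOURCE B (Python) =====
-- _COLORS = ["Black", "Dark Gray", "Gray", "Light Gray", "Red", "Orange",
--            "Yellow", "Green", "Cyan", "Blue", "Purple", "Pink"]
--
-- def bin_to_color(bin_index):
--     if 0 <= bin_index < 230:
--         return _COLORS[(bin_index + 10) // 20]
--     if 230 <= bin_index < 255:
--         return "White"
--     return "Unknown"
-- ===== Notes on version B (the rewrite author's own statement) =====
-- stated objective: simpler
-- what changed: Replaces the linear scan over 13 dict-keyed intervals with a closed-form index computation (bin_index+10)//20 into a color table, since all inner interval boundaries are evenly spaced by 20.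
import Mathlib
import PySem

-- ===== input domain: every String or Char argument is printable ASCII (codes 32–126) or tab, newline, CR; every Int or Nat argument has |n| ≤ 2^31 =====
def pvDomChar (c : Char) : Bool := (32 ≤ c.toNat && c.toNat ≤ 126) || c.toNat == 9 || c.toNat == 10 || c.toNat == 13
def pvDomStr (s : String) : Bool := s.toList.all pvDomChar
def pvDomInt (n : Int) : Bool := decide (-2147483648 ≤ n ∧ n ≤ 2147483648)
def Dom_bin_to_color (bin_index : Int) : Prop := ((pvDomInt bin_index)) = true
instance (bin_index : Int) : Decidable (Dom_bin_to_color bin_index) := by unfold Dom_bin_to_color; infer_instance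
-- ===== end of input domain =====

-- B replaces A's linear scan over 13 intervals by a closed-form table index; simpler.
-- ===== PORT A =====
def pvColorRanges : List ((Int × Int) × String) :=
  [((0, 10), "Black"), ((10, 30), "Dark Gray"), ((30, 50), "Gray"),
   ((50, 70), "Light Gray"), ((70, 90), "Red"), ((90, 110), "Orange"),
   ((110, 130), "Yellow"), ((130, 150), "Green"), ((150, 170), "Cyan"),
   ((170, 190), "Blue"), ((190, 210), "Purple"), ((210, 230), "Pink"),
   ((230, 255), "White")]

def pvScanRanges (bin_index : Int) : List ((Int × Int) × String) → String
  | [] => "Unknown"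
  | (range_, color) :: rest =>
      if range_.1 ≤ bin_index ∧ bin_index < range_.2 then color
      else pvScanRanges bin_index rest

def bin_to_color (bin_index : Int) : String :=
  pvScanRanges bin_index pvColorRanges

-- ===== PORT B =====
def pvColorsB : List String :=
  ["Black", "Dark Gray", "Gray", "Light Gray", "Red", "Orange",
   "Yellow", "Green", "Cyan", "Blue", "Purple", "Pink"]

def bin_to_color_alt (bin_index : Int) : String :=
  if 0 ≤ bin_index ∧ bin_index < 230 then
    (PySem.List.pyGet? pvColorsB (PySem.Int.floordiv (bin_index + 10) 20)).getD "Unknown"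
  else if 230 ≤ bin_index ∧ bin_index < 255 then "White"
  else "Unknown"

-- ===== PRECONDITION & SPEC =====
def Spec_bin_to_color (bin_index : Int) (out : String) : Prop := out = bin_to_color_alt bin_index
instance (bin_index : Int) (out : String) : Decidable (Spec_bin_to_color bin_index out) := by unfold Spec_bin_to_color; infer_instance

-- ===== CLAIM (what is proved, stated in full; the proofs are below) =====
def Claim_equal_bin_to_color : Prop := ∀ (bin_index : Int), Dom_bin_to_color bin_index → Spec_bin_to_color bin_index (bin_to_color bin_index)

-- ===== LEMMAS AND PROOFS =====

-- ===== VERDICT (by name: the statement is the Claim_ definition above) =====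
lemma pvScan_nil (b : Int) : pvScanRanges b [] = "Unknown" := rfl

lemma pvScan_cons (b : Int) (p : (Int × Int) × String) (rest : List ((Int × Int) × String)) :
    pvScanRanges b (p :: rest) =
      if p.1.1 ≤ b ∧ b < p.1.2 then p.2 else pvScanRanges b rest := rfl

lemma bin_to_color_char (b : Int) :
    bin_to_color b =
      (if 0 ≤ b ∧ b < 10 then "Black" else if 10 ≤ b ∧ b < 30 then "Dark Gray"
       else if 30 ≤ b ∧ b < 50 then "Gray" else if 50 ≤ b ∧ b < 70 then "Light Gray"
       else if 70 ≤ b ∧ b < 90 then "Red" else if 90 ≤ b ∧ b < 110 then "Orange"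
       else if 110 ≤ b ∧ b < 130 then "Yellow" else if 130 ≤ b ∧ b < 150 then "Green"
       else if 150 ≤ b ∧ b < 170 then "Cyan" else if 170 ≤ b ∧ b < 190 then "Blue"
       else if 190 ≤ b ∧ b < 210 then "Purple" else if 210 ≤ b ∧ b < 230 then "Pink"
       else if 230 ≤ b ∧ b < 255 then "White" else "Unknown") := by
  unfold bin_to_color pvColorRanges
  simp only [pvScan_cons, pvScan_nil]

theorem bin_to_color_spec : Claim_equal_bin_to_color := by
  intro b _
  show bin_to_color b = bin_to_color_alt b
  have hf : ∀ k : Int, 0 ≤ k → PySem.Int.floordiv k 20 = k / 20 :=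
    fun k _ => PySem.Int.floordiv_eq_ediv_of_pos (by omega)
  rw [bin_to_color_char b]
  unfold bin_to_color_alt
  by_cases h1 : (0 : Int) ≤ b ∧ b < 10
  · rw [if_pos h1, if_pos (show (0 : Int) ≤ b ∧ b < 230 from by omega),
        hf _ (by omega), show (b + 10) / 20 = 0 from by omega]
    rfl
  rw [if_neg h1]
  by_cases h2 : (10 : Int) ≤ b ∧ b < 30
  · rw [if_pos h2, if_pos (show (0 : Int) ≤ b ∧ b < 230 from by omega),
        hf _ (by omega), show (b + 10) / 20 = 1 from by omega]
    rfl
  rw [if_neg h2]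
  by_cases h3 : (30 : Int) ≤ b ∧ b < 50
  · rw [if_pos h3, if_pos (show (0 : Int) ≤ b ∧ b < 230 from by omega),
        hf _ (by omega), show (b + 10) / 20 = 2 from by omega]
    rfl
  rw [if_neg h3]
  by_cases h4 : (50 : Int) ≤ b ∧ b < 70
  · rw [if_pos h4, if_pos (show (0 : Int) ≤ b ∧ b < 230 from by omega),
        hf _ (by omega), show (b + 10) / 20 = 3 from by omega]
    rfl
  rw [if_neg h4]
  by_cases h5 : (70 : Int) ≤ b ∧ b < 90
  · rw [if_pos h5, if_pos (show (0 : Int) ≤ b ∧ b < 230 from by omega),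
        hf _ (by omega), show (b + 10) / 20 = 4 from by omega]
    rfl
  rw [if_neg h5]
  by_cases h6 : (90 : Int) ≤ b ∧ b < 110
  · rw [if_pos h6, if_pos (show (0 : Int) ≤ b ∧ b < 230 from by omega),
        hf _ (by omega), show (b + 10) / 20 = 5 from by omega]
    rfl
  rw [if_neg h6]
  by_cases h7 : (110 : Int) ≤ b ∧ b < 130
  · rw [if_pos h7, if_pos (show (0 : Int) ≤ b ∧ b < 230 from by omega),
        hf _ (by omega), show (b + 10) / 20 = 6 from by omega]
    rfl
  rw [if_neg h7]
  by_cases h8 : (130 : Int) ≤ b ∧ b < 150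
  · rw [if_pos h8, if_pos (show (0 : Int) ≤ b ∧ b < 230 from by omega),
        hf _ (by omega), show (b + 10) / 20 = 7 from by omega]
    rfl
  rw [if_neg h8]
  by_cases h9 : (150 : Int) ≤ b ∧ b < 170
  · rw [if_pos h9, if_pos (show (0 : Int) ≤ b ∧ b < 230 from by omega),
        hf _ (by omega), show (b + 10) / 20 = 8 from by omega]
    rfl
  rw [if_neg h9]
  by_cases h10 : (170 : Int) ≤ b ∧ b < 190
  · rw [if_pos h10, if_pos (show (0 : Int) ≤ b ∧ b < 230 from by omega),
        hf _ (by omega), show (b + 10) / 20 = 9 from by omega]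
    rfl
  rw [if_neg h10]
  by_cases h11 : (190 : Int) ≤ b ∧ b < 210
  · rw [if_pos h11, if_pos (show (0 : Int) ≤ b ∧ b < 230 from by omega),
        hf _ (by omega), show (b + 10) / 20 = 10 from by omega]
    rfl
  rw [if_neg h11]
  by_cases h12 : (210 : Int) ≤ b ∧ b < 230
  · rw [if_pos h12, if_pos (show (0 : Int) ≤ b ∧ b < 230 from by omega),
        hf _ (by omega), show (b + 10) / 20 = 11 from by omega]
    rfl
  rw [if_neg h12]
  by_cases h13 : (230 : Int) ≤ b ∧ b < 255
  · rw [if_pos h13, if_neg (show ¬((0 : Int) ≤ b ∧ b < 230) from by omega)]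
  rw [if_neg h13, if_neg (show ¬((0 : Int) ≤ b ∧ b < 230) from by omega)]
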